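-- pv_equiv track=rewrite | github.com/s4bject/tinkoff_algo | contest7/F.py | find_max_square
-- ===== SOURCE A (Python) =====
-- def find_max_square(n, m, grid):
--     right = [[0] * m for _ in range(n)]
--     down = [[0] * m for _ in range(n)]
--     for i in range(n):
--         for j in range(m):
--             if grid[i][j] == 1:
--                 right[i][j] = right[i][j - 1] + 1 if j > 0 else 1
--                 down[i][j] = down[i - 1][j] + 1 if i > 0 else 1
--     max_side_length = 0
--     top_left_x = 0
--     top_left_y = 0
--
--     for i in range(n):
--         for j in range(m):
--             side_length = min(right[i][j], down[i][j])
--             while side_length > max_side_length: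
--                 if down[i][j - side_length + 1] >= side_length and right[i - side_length + 1][j] >= side_length:
--                     max_side_length = side_length
--                     top_left_x = i - side_length + 1
--                     top_left_y = j - side_length + 1
--                 side_length -= 1
--
--     return max_side_length, top_left_x, top_left_y
-- ===== SOURCE B (Python) =====
-- def find_max_square(n, m, grid):
--     # 2D prefix sums over the indicator (cell == 1); each candidate frame is
--     # validated by four O(1) border-segment sums instead of run-length tables.
--     P = [[0] * (m + 1) for _ in range(n + 1)]
--     for i in range(n):
--         for j in range(m):
--             P[i + 1][j + 1] = (P[i][j + 1] + P[i + 1][j] - P[i][j]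
--                                + (1 if grid[i][j] == 1 else 0))
--
--     def rect(r1, c1, r2, c2):
--         return P[r2 + 1][c2 + 1] - P[r1][c2 + 1] - P[r2 + 1][c1] + P[r1][c1]
--
--     best = 0
--     top_left_x = 0
--     top_left_y = 0
--     for i in range(n):
--         for j in range(m):
--             s = min(i, j) + 1
--             while s > best:
--                 r = i - s + 1
--                 c = j - s + 1
--                 if (rect(r, c, r, j) == s and rect(i, c, i, j) == s
--                         and rect(r, c, i, c) == s and rect(r, j, i, j) == s):
--                     best = s
--                     top_left_x = r
--                     top_left_y = c
--                 s -= 1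
--     return best, top_left_x, top_left_y
-- ===== Notes on version B (the rewrite author's own statement) =====
-- stated objective: alternative
-- what changed: Replaces the two run-length DP tables (right/down) by a single 2D prefix-sum table over the indicator cell==1 and validates each candidate frame with four O(1) border-segment sums, descending from min(i,j)+1 per bottom-right corner.
import Mathlib
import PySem

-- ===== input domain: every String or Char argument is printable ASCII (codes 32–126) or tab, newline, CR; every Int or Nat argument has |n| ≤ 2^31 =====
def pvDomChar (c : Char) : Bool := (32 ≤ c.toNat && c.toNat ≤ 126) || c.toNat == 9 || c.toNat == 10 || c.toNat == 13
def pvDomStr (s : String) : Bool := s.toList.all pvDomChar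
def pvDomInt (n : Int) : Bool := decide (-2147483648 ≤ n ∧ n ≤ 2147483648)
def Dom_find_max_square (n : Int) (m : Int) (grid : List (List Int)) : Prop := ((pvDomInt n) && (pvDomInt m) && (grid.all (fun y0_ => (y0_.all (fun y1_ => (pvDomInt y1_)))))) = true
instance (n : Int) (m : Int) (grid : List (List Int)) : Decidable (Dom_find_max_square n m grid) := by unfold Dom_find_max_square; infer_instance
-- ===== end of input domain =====

-- B replaces A's two run-length DP tables by one 2D prefix-sum table over (cell == 1) and
-- validates each candidate frame by four O(1) border-segment sums (objective: alternative).

-- ===== PORT A =====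
-- shared 2D indexing helpers (Python t[i][j] and t[i][j] = v)
def pvGet2 (t : List (List Int)) (i j : Int) : Int :=
  PySem.List.pyGetD (PySem.List.pyGetD t i []) j 0

def pvSet2 (t : List (List Int)) (i j : Int) (v : Int) : List (List Int) :=
  PySem.List.pySetD t i (PySem.List.pySetD (PySem.List.pyGetD t i []) j v)

-- one cell of A's table-building loop
def pvStepRD (grid : List (List Int)) (rd : List (List Int) × List (List Int)) (i j : Int) :
    List (List Int) × List (List Int) :=
  if pvGet2 grid i j = 1 then
    (pvSet2 rd.1 i j (if j > 0 then pvGet2 rd.1 i (j - 1) + 1 else 1),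
     pvSet2 rd.2 i j (if i > 0 then pvGet2 rd.2 (i - 1) j + 1 else 1))
  else rd

-- A's inner while loop at bottom-right corner (i, j); st = (max_side_length, top_left_x, top_left_y)
-- (fuel = number of remaining loop iterations, s - st.1; a pure totality device)
def pvWhileA (right down : List (List Int)) (i j : Int) :
    Nat → Int → Int × Int × Int → Int × Int × Int
  | 0, _, st => st
  | k + 1, s, st =>
    if s > st.1 then
      if pvGet2 down i (j - s + 1) ≥ s ∧ pvGet2 right (i - s + 1) j ≥ s then
        pvWhileA right down i j k (s - 1) (s, i - s + 1, j - s + 1)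
      else pvWhileA right down i j k (s - 1) st
    else st

def find_max_square (n : Int) (m : Int) (grid : List (List Int)) : Int × Int × Int :=
  let zeros := (PySem.List.pyRange 0 n 1).map (fun _ => List.replicate m.toNat (0 : Int))
  let rd := (PySem.List.pyRange 0 n 1).foldl (fun rd i =>
      (PySem.List.pyRange 0 m 1).foldl (fun rd j => pvStepRD grid rd i j) rd) (zeros, zeros)
  (PySem.List.pyRange 0 n 1).foldl (fun st i =>
    (PySem.List.pyRange 0 m 1).foldl (fun st j =>
      pvWhileA rd.1 rd.2 i j (min (pvGet2 rd.1 i j) (pvGet2 rd.2 i j) - st.1).toNat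
        (min (pvGet2 rd.1 i j) (pvGet2 rd.2 i j)) st) st) (0, 0, 0)

-- ===== PORT B =====
-- one cell of B's prefix-sum building loop
def pvStepP (grid : List (List Int)) (P : List (List Int)) (i j : Int) : List (List Int) :=
  pvSet2 P (i + 1) (j + 1) (pvGet2 P i (j + 1) + pvGet2 P (i + 1) j - pvGet2 P i j +
    (if pvGet2 grid i j = 1 then 1 else 0))

-- rectangle sum [r1..r2] × [c1..c2] from the prefix table
def pvRect (P : List (List Int)) (r1 c1 r2 c2 : Int) : Int :=
  pvGet2 P (r2 + 1) (c2 + 1) - pvGet2 P r1 (c2 + 1) - pvGet2 P (r2 + 1) c1 + pvGet2 P r1 c1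

-- B's inner while loop: four border-segment sums validate the frame of side s
-- (fuel = number of remaining loop iterations, s - st.1; a pure totality device)
def pvWhileB (P : List (List Int)) (i j : Int) :
    Nat → Int → Int × Int × Int → Int × Int × Int
  | 0, _, st => st
  | k + 1, s, st =>
    if s > st.1 then
      if pvRect P (i - s + 1) (j - s + 1) (i - s + 1) j = s ∧
         pvRect P i (j - s + 1) i j = s ∧
         pvRect P (i - s + 1) (j - s + 1) i (j - s + 1) = s ∧
         pvRect P (i - s + 1) j i j = s then
        pvWhileB P i j k (s - 1) (s, i - s + 1, j - s + 1)
      else pvWhileB P i j k (s - 1) st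
    else st

def find_max_square_alt (n : Int) (m : Int) (grid : List (List Int)) : Int × Int × Int :=
  let P0 := (PySem.List.pyRange 0 (n + 1) 1).map (fun _ => List.replicate (m + 1).toNat (0 : Int))
  let P := (PySem.List.pyRange 0 n 1).foldl (fun P i =>
      (PySem.List.pyRange 0 m 1).foldl (fun P j => pvStepP grid P i j) P) P0
  (PySem.List.pyRange 0 n 1).foldl (fun st i =>
    (PySem.List.pyRange 0 m 1).foldl (fun st j =>
      pvWhileB P i j (min i j + 1 - st.1).toNat (min i j + 1) st) st) (0, 0, 0)

-- ===== PRECONDITION & SPEC =====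
-- Pre_ excludes exactly the inputs where Python A raises IndexError: grid cells are only
-- touched when 0 < n and 0 < m, and then n must not exceed the number of rows and each of the
-- first n rows must have at least m entries.
def Pre_find_max_square (n : Int) (m : Int) (grid : List (List Int)) : Prop :=
  0 < n → 0 < m → (n ≤ (grid.length : Int) ∧ ∀ row ∈ grid.take n.toNat, m ≤ (row.length : Int))

instance (n : Int) (m : Int) (grid : List (List Int)) : Decidable (Pre_find_max_square n m grid) := by
  unfold Pre_find_max_square; infer_instance

def pvWitness_find_max_square : Int × Int × List (List Int) := (2, 2, [[1, 1], [1, 1]])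

def Spec_find_max_square (n : Int) (m : Int) (grid : List (List Int)) (out : Int × Int × Int) : Prop := out = find_max_square_alt n m grid
instance (n : Int) (m : Int) (grid : List (List Int)) (out : Int × Int × Int) : Decidable (Spec_find_max_square n m grid out) := by unfold Spec_find_max_square; infer_instance

-- ===== CLAIM (what is proved, stated in full; the proofs are below) =====
def Claim_equal_find_max_square : Prop := ∀ (n : Int) (m : Int) (grid : List (List Int)), Dom_find_max_square n m grid → Pre_find_max_square n m grid → Spec_find_max_square n m grid (find_max_square n m grid)

-- ===== LEMMAS AND PROOFS =====

-- ---- mathematical description of the grid (Nat indices) ----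
def pvCell (g : List (List Int)) (p q : Nat) : Int := (g.getD p []).getD q 0

def pvOne (g : List (List Int)) (p q : Nat) : Int := if pvCell g p q = 1 then 1 else 0

def pvRowRun (g : List (List Int)) (p : Nat) : Nat → Nat
  | 0 => if pvCell g p 0 = 1 then 1 else 0
  | q + 1 => if pvCell g p (q + 1) = 1 then pvRowRun g p q + 1 else 0

def pvColRun (g : List (List Int)) (q : Nat) : Nat → Nat
  | 0 => if pvCell g 0 q = 1 then 1 else 0
  | p + 1 => if pvCell g (p + 1) q = 1 then pvColRun g q p + 1 else 0

def pvRowPref (g : List (List Int)) (p : Nat) : Nat → Int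
  | 0 => 0
  | b + 1 => pvRowPref g p b + pvOne g p b

def pvColPref (g : List (List Int)) (q : Nat) : Nat → Int
  | 0 => 0
  | a + 1 => pvColPref g q a + pvOne g a q

def pvPref (g : List (List Int)) : Nat → Nat → Int
  | 0, _ => 0
  | a + 1, b => pvPref g a b + pvRowPref g a b

-- ---- basic facts ----
theorem pvOne_bounds (g : List (List Int)) (p q : Nat) : 0 ≤ pvOne g p q ∧ pvOne g p q ≤ 1 := by
  unfold pvOne; split_ifs <;> omega

theorem pvOne_eq_one_iff (g : List (List Int)) (p q : Nat) :
    pvOne g p q = 1 ↔ pvCell g p q = 1 := by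
  unfold pvOne; split_ifs with h <;> simp [h]

theorem pvPref_zero_right (g : List (List Int)) (a : Nat) : pvPref g a 0 = 0 := by
  induction a with
  | zero => rfl
  | succ a ih => simp [pvPref, pvRowPref, ih]

theorem pvPref_col (g : List (List Int)) (q : Nat) :
    ∀ a, pvPref g a (q + 1) = pvPref g a q + pvColPref g q a := by
  intro a
  induction a with
  | zero => simp [pvPref, pvColPref]
  | succ a ih => simp [pvPref, pvRowPref, pvColPref, ih]; ring

theorem pvRowPref_diff_bounds (g : List (List Int)) (p : Nat) :
    ∀ b b' : Nat, b ≤ b' →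
      0 ≤ pvRowPref g p b' - pvRowPref g p b ∧
      pvRowPref g p b' - pvRowPref g p b ≤ ((b' - b : Nat) : Int) := by
  intro b b' h
  induction b' with
  | zero => interval_cases b; simp
  | succ b' ih =>
    rcases Nat.lt_or_ge b (b' + 1) with hlt | hge
    · have := ih (by omega)
      have hb := pvOne_bounds g p b'
      have hc : ((b' + 1 - b : Nat) : Int) = ((b' - b : Nat) : Int) + 1 := by omega
      simp only [pvRowPref] at *
      constructor <;> omega
    · have : b = b' + 1 := by omega
      subst this; simp

theorem pvColPref_diff_bounds (g : List (List Int)) (q : Nat) :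
    ∀ a a' : Nat, a ≤ a' →
      0 ≤ pvColPref g q a' - pvColPref g q a ∧
      pvColPref g q a' - pvColPref g q a ≤ ((a' - a : Nat) : Int) := by
  intro a a' h
  induction a' with
  | zero => interval_cases a; simp
  | succ a' ih =>
    rcases Nat.lt_or_ge a (a' + 1) with hlt | hge
    · have := ih (by omega)
      have hb := pvOne_bounds g a' q
      have hc : ((a' + 1 - a : Nat) : Int) = ((a' - a : Nat) : Int) + 1 := by omega
      simp only [pvColPref] at *
      constructor <;> omega
    · have : a = a' + 1 := by omega
      subst this; simp

theorem pvRowRun_le (g : List (List Int)) (p : Nat) : ∀ q, pvRowRun g p q ≤ q + 1 := by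
  intro q
  induction q with
  | zero => simp [pvRowRun]; split_ifs <;> omega
  | succ q ih => simp only [pvRowRun]; split_ifs <;> omega

theorem pvColRun_le (g : List (List Int)) (q : Nat) : ∀ p, pvColRun g q p ≤ p + 1 := by
  intro p
  induction p with
  | zero => simp [pvColRun]; split_ifs <;> omega
  | succ p ih => simp only [pvColRun]; split_ifs <;> omega

-- a border-segment sum of length s equals s iff the run ending there has length ≥ s
theorem pvRowRun_pos_iff (g : List (List Int)) (p q : Nat) :
    1 ≤ pvRowRun g p q ↔ pvCell g p q = 1 := by
  cases q <;> simp only [pvRowRun] <;> split_ifs with hc <;> simp [hc]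

theorem pvColRun_pos_iff (g : List (List Int)) (q p : Nat) :
    1 ≤ pvColRun g q p ↔ pvCell g p q = 1 := by
  cases p <;> simp only [pvColRun] <;> split_ifs with hc <;> simp [hc]

theorem pvRowSeg_iff (g : List (List Int)) (p : Nat) :
    ∀ (s q : Nat), 1 ≤ s → s ≤ q + 1 →
      (pvRowPref g p (q + 1) - pvRowPref g p (q + 1 - s) = (s : Int) ↔ s ≤ pvRowRun g p q) := by
  intro s
  induction s with
  | zero => intro q h1 _; exact absurd h1 (by omega)
  | succ s ih =>
    intro q h1 h2
    rcases Nat.eq_zero_or_pos s with rfl | hs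
    · rw [show q + 1 - 1 = q from by omega,
        show pvRowPref g p (q + 1) = pvRowPref g p q + pvOne g p q from rfl,
        show (1 ≤ pvRowRun g p q) = (pvCell g p q = 1) from propext (pvRowRun_pos_iff g p q),
        ← pvOne_eq_one_iff]
      have := pvOne_bounds g p q
      push_cast
      constructor <;> intro <;> omega
    · obtain ⟨q0, rfl⟩ : ∃ q0, q = q0 + 1 := ⟨q - 1, by omega⟩
      have ihq := ih q0 (by omega) (by omega)
      have hone := pvOne_bounds g p (q0 + 1)
      have hdb := pvRowPref_diff_bounds g p (q0 + 1 - s) (q0 + 1) (by omega)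
      rw [show ((q0 + 1) - (q0 + 1 - s) : Nat) = s from by omega] at hdb
      have hsplit : pvRowPref g p (q0 + 1 + 1) - pvRowPref g p (q0 + 1 + 1 - (s + 1)) =
          pvOne g p (q0 + 1) + (pvRowPref g p (q0 + 1) - pvRowPref g p (q0 + 1 - s)) := by
        rw [show q0 + 1 + 1 - (s + 1) = q0 + 1 - s from by omega,
          show pvRowPref g p (q0 + 1 + 1) = pvRowPref g p (q0 + 1) + pvOne g p (q0 + 1) from rfl]
        ring
      rw [hsplit]
      have hrun : (s + 1 ≤ pvRowRun g p (q0 + 1)) ↔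
          (pvCell g p (q0 + 1) = 1 ∧ s ≤ pvRowRun g p q0) := by
        simp only [pvRowRun]; split_ifs with hc <;> simp [hc]
      constructor
      · intro h
        push_cast at h
        refine hrun.mpr ⟨(pvOne_eq_one_iff g p (q0 + 1)).mp (by omega), ihq.mp (by omega)⟩
      · intro h
        obtain ⟨hc, hr⟩ := hrun.mp h
        have e1 := ihq.mpr hr
        have e2 := (pvOne_eq_one_iff g p (q0 + 1)).mpr hc
        push_cast
        omega

theorem pvColSeg_iff (g : List (List Int)) (q : Nat) :
    ∀ (s p : Nat), 1 ≤ s → s ≤ p + 1 →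
      (pvColPref g q (p + 1) - pvColPref g q (p + 1 - s) = (s : Int) ↔ s ≤ pvColRun g q p) := by
  intro s
  induction s with
  | zero => intro p h1 _; exact absurd h1 (by omega)
  | succ s ih =>
    intro p h1 h2
    rcases Nat.eq_zero_or_pos s with rfl | hs
    · rw [show p + 1 - 1 = p from by omega,
        show pvColPref g q (p + 1) = pvColPref g q p + pvOne g p q from rfl,
        show (1 ≤ pvColRun g q p) = (pvCell g p q = 1) from propext (pvColRun_pos_iff g q p),
        ← pvOne_eq_one_iff]
      have := pvOne_bounds g p q
      push_cast
      constructor <;> intro <;> omega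
    · obtain ⟨p0, rfl⟩ : ∃ p0, p = p0 + 1 := ⟨p - 1, by omega⟩
      have ihp := ih p0 (by omega) (by omega)
      have hone := pvOne_bounds g (p0 + 1) q
      have hdb := pvColPref_diff_bounds g q (p0 + 1 - s) (p0 + 1) (by omega)
      rw [show ((p0 + 1) - (p0 + 1 - s) : Nat) = s from by omega] at hdb
      have hsplit : pvColPref g q (p0 + 1 + 1) - pvColPref g q (p0 + 1 + 1 - (s + 1)) =
          pvOne g (p0 + 1) q + (pvColPref g q (p0 + 1) - pvColPref g q (p0 + 1 - s)) := by
        rw [show p0 + 1 + 1 - (s + 1) = p0 + 1 - s from by omega,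
          show pvColPref g q (p0 + 1 + 1) = pvColPref g q (p0 + 1) + pvOne g (p0 + 1) q from rfl]
        ring
      rw [hsplit]
      have hrun : (s + 1 ≤ pvColRun g q (p0 + 1)) ↔
          (pvCell g (p0 + 1) q = 1 ∧ s ≤ pvColRun g q p0) := by
        simp only [pvColRun]; split_ifs with hc <;> simp [hc]
      constructor
      · intro h
        push_cast at h
        refine hrun.mpr ⟨(pvOne_eq_one_iff g (p0 + 1) q).mp (by omega), ihp.mp (by omega)⟩
      · intro h
        obtain ⟨hc, hr⟩ := hrun.mp h
        have e1 := ihp.mpr hr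
        have e2 := (pvOne_eq_one_iff g (p0 + 1) q).mpr hc
        push_cast
        omega

-- ---- 2D table access ----
theorem pvGet2_natCast (t : List (List Int)) (p q : Nat) :
    pvGet2 t (p : Int) (q : Int) = (t.getD p []).getD q 0 := by
  simp [pvGet2]

theorem pvSet2_natCast (t : List (List Int)) (p q : Nat) (v : Int) :
    pvSet2 t (p : Int) (q : Int) v = t.set p ((t.getD p []).set q v) := by
  simp [pvSet2]

def pvShape (t : List (List Int)) (a b : Nat) : Prop :=
  t.length = a ∧ ∀ r ∈ t, r.length = b

theorem pvShape_set (t : List (List Int)) (a b p q : Nat) (v : Int)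
    (hp : p < t.length) (h : pvShape t a b) :
    pvShape (t.set p ((t.getD p []).set q v)) a b := by
  obtain ⟨h1, h2⟩ := h
  refine ⟨by simpa, ?_⟩
  intro r hr
  rcases List.mem_or_eq_of_mem_set hr with hm | rfl
  · exact h2 r hm
  · rw [List.getD_eq_getElem t [] hp]
    simpa using h2 _ (t.getElem_mem hp)

theorem pvGet2_set (t : List (List Int)) (p q p' q' : Nat) (v : Int) (hp : p < t.length) :
    ((t.set p ((t.getD p []).set q v)).getD p' []).getD q' 0 =
      if p' = p ∧ q' = q ∧ q < (t.getD p []).length then v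
      else (t.getD p' []).getD q' 0 := by
  by_cases hpp : p' = p
  · subst hpp
    have hrow : (t.set p' ((t.getD p' []).set q v)).getD p' [] = (t.getD p' []).set q v := by
      rw [List.getD_eq_getElem?_getD, List.getElem?_set]
      simp [hp, List.getD_eq_getElem?_getD]
    rw [hrow]
    by_cases hqq : q' = q
    · subst hqq
      by_cases hq : q' < (t.getD p' []).length
      · have hq2 := hq
        rw [List.getD_eq_getElem?_getD] at hq2
        rw [if_pos ⟨rfl, rfl, hq⟩, List.getD_eq_getElem?_getD, List.getElem?_set]
        simp [hq2]
      · have hq2 := hq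
        rw [List.getD_eq_getElem?_getD] at hq2
        rw [if_neg (by tauto), List.getD_eq_getElem?_getD, List.getElem?_set]
        simp [hq2, List.getD_eq_getElem?_getD]
    · rw [if_neg (by tauto), List.getD_eq_getElem?_getD,
        List.getElem?_set_ne (fun h => hqq (h.symm)), ← List.getD_eq_getElem?_getD]
  · have heq : (t.set p ((t.getD p []).set q v)).getD p' [] = t.getD p' [] := by
      rw [List.getD_eq_getElem?_getD, List.getElem?_set_ne (fun h => hpp (h.symm)),
        ← List.getD_eq_getElem?_getD]
    rw [if_neg (by tauto), heq]

-- ---- generic loop lemmas over pyRange (invariant / relation) ----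
theorem pyRange_fold_inv {σ : Type} (f : σ → Int → σ) (P : Int → σ → Prop) (a0 b : Int)
    (hstep : ∀ j s, a0 ≤ j → j < b → P j s → P (j + 1) (f s j)) :
    ∀ (k : Nat) (a : Int), (b - a).toNat ≤ k → a0 ≤ a → a ≤ b →
      ∀ s, P a s → P b ((PySem.List.pyRange a b 1).foldl f s) := by
  intro k
  induction k with
  | zero =>
    intro a hk ha hab s hs
    have : a = b := by omega
    subst this
    rw [PySem.List.pyRange_one_eq_nil le_rfl]
    simpa
  | succ k ih =>
    intro a hk ha hab s hs
    rcases eq_or_lt_of_le hab with rfl | hlt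
    · rw [PySem.List.pyRange_one_eq_nil le_rfl]; simpa
    · rw [PySem.List.pyRange_one_cons hlt]
      exact ih (a + 1) (by omega) (by omega) (by omega) _ (hstep a s ha hlt hs)

theorem pyRange_fold_rel {σ τ : Type} (f : σ → Int → σ) (g : τ → Int → τ)
    (R : σ → τ → Prop) (a0 b : Int)
    (hstep : ∀ j s t, a0 ≤ j → j < b → R s t → R (f s j) (g t j)) :
    ∀ (k : Nat) (a : Int), (b - a).toNat ≤ k → a0 ≤ a →
      ∀ s t, R s t → R ((PySem.List.pyRange a b 1).foldl f s) ((PySem.List.pyRange a b 1).foldl g t) := by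
  intro k
  induction k with
  | zero =>
    intro a hk ha s t hst
    rw [PySem.List.pyRange_one_eq_nil (by omega)]
    simpa
  | succ k ih =>
    intro a hk ha s t hst
    rcases Int.lt_or_le a b with hlt | hge
    · rw [PySem.List.pyRange_one_cons hlt]
      exact ih (a + 1) (by omega) (by omega) _ _ (hstep a s t ha hlt hst)
    · rw [PySem.List.pyRange_one_eq_nil hge]
      simpa

-- ---- characterization of A's run-length tables ----
theorem pvShape_row_len (t : List (List Int)) (a b p : Nat) (h : pvShape t a b) (hp : p < a) :
    (t.getD p []).length = b := by
  obtain ⟨h1, h2⟩ := h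
  rw [List.getD_eq_getElem t [] (by omega)]
  exact h2 _ (t.getElem_mem _)

theorem pvRowRun_eq_zero (g : List (List Int)) (p q : Nat) (hc : pvCell g p q ≠ 1) :
    pvRowRun g p q = 0 := by
  cases q <;> simp [pvRowRun, hc]

theorem pvColRun_eq_zero (g : List (List Int)) (q p : Nat) (hc : pvCell g p q ≠ 1) :
    pvColRun g q p = 0 := by
  cases p <;> simp [pvColRun, hc]

def pvInvRD (g : List (List Int)) (N M i a : Nat) (R D : List (List Int)) : Prop :=
  pvShape R N M ∧ pvShape D N M ∧
  ∀ p q : Nat, p < N → q < M →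
    (R.getD p []).getD q 0 = (if p < i ∨ (p = i ∧ q < a) then (pvRowRun g p q : Int) else 0) ∧
    (D.getD p []).getD q 0 = (if p < i ∨ (p = i ∧ q < a) then (pvColRun g q p : Int) else 0)

theorem pvStepRD_inv (g : List (List Int)) (N M i a : Nat) (R D : List (List Int))
    (hi : i < N) (ha : a < M) (h : pvInvRD g N M i a R D) :
    pvInvRD g N M i (a + 1) (pvStepRD g (R, D) (i : Int) (a : Int)).1
      (pvStepRD g (R, D) (i : Int) (a : Int)).2 := by
  obtain ⟨hR, hD, hent⟩ := h
  have hcell : pvGet2 g (i : Int) (a : Int) = pvCell g i a := pvGet2_natCast g i a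
  by_cases hc : pvCell g i a = 1
  · -- the cell is a 1: both tables are written at (i, a)
    have hvR : (if (a : Int) > 0 then pvGet2 R (i : Int) ((a : Int) - 1) + 1 else 1) =
        (pvRowRun g i a : Int) := by
      cases a with
      | zero => simp [pvRowRun, hc]
      | succ a0 =>
        have hge : ((a0 + 1 : Nat) : Int) - 1 = (a0 : Int) := by push_cast; ring
        rw [if_pos (by positivity), hge, pvGet2_natCast,
          (hent i a0 hi (by omega)).1, if_pos (by omega)]
        simp [pvRowRun, hc]
    have hvD : (if (i : Int) > 0 then pvGet2 D ((i : Int) - 1) (a : Int) + 1 else 1) =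
        (pvColRun g a i : Int) := by
      cases i with
      | zero => simp [pvColRun, hc]
      | succ i0 =>
        have hge : ((i0 + 1 : Nat) : Int) - 1 = (i0 : Int) := by push_cast; ring
        rw [if_pos (by positivity), hge, pvGet2_natCast,
          (hent i0 a (by omega) ha).2, if_pos (by omega)]
        simp [pvColRun, hc]
    have hstep : pvStepRD g (R, D) (i : Int) (a : Int) =
        (R.set i ((R.getD i []).set a (pvRowRun g i a)),
         D.set i ((D.getD i []).set a (pvColRun g a i))) := by
      simp only [pvStepRD, hcell, if_pos hc]
      rw [hvR, hvD, pvSet2_natCast, pvSet2_natCast]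
    rw [hstep]
    have hRlen : i < R.length := by rw [hR.1]; omega
    have hDlen : i < D.length := by rw [hD.1]; omega
    refine ⟨pvShape_set R N M i a _ hRlen hR, pvShape_set D N M i a _ hDlen hD, ?_⟩
    intro p q hp hq
    have hrowR : (R.getD i []).length = M := pvShape_row_len R N M i hR hi
    have hrowD : (D.getD i []).length = M := pvShape_row_len D N M i hD hi
    constructor
    · rw [pvGet2_set R i a p q _ hRlen]
      by_cases hpq : p = i ∧ q = a
      · obtain ⟨rfl, rfl⟩ := hpq
        rw [if_pos ⟨rfl, rfl, by omega⟩, if_pos (by omega)]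
      · rw [if_neg (by rw [hrowR]; tauto), (hent p q hp hq).1]
        have : (p < i ∨ (p = i ∧ q < a + 1)) ↔ (p < i ∨ (p = i ∧ q < a)) := by
          omega
        rw [if_congr this rfl rfl]
    · rw [pvGet2_set D i a p q _ hDlen]
      by_cases hpq : p = i ∧ q = a
      · obtain ⟨rfl, rfl⟩ := hpq
        rw [if_pos ⟨rfl, rfl, by omega⟩, if_pos (by omega)]
      · rw [if_neg (by rw [hrowD]; tauto), (hent p q hp hq).2]
        have : (p < i ∨ (p = i ∧ q < a + 1)) ↔ (p < i ∨ (p = i ∧ q < a)) := by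
          omega
        rw [if_congr this rfl rfl]
  · -- cell is not a 1: nothing is written, and the runs at (i, a) are 0
    have hstep : pvStepRD g (R, D) (i : Int) (a : Int) = (R, D) := by
      simp only [pvStepRD, hcell, if_neg hc]
    rw [hstep]
    refine ⟨hR, hD, ?_⟩
    intro p q hp hq
    have h1 := (hent p q hp hq).1
    have h2 := (hent p q hp hq).2
    by_cases hpq : p = i ∧ q = a
    · obtain ⟨rfl, rfl⟩ := hpq
      rw [if_neg (by omega)] at h1 h2
      rw [h1, h2, if_pos (by omega), if_pos (by omega),
        pvRowRun_eq_zero g p q hc, pvColRun_eq_zero g q p hc]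
      simp
    · have : (p < i ∨ (p = i ∧ q < a + 1)) ↔ (p < i ∨ (p = i ∧ q < a)) := by
        omega
      rw [h1, h2, if_congr this rfl rfl, if_congr this rfl rfl]
      exact ⟨rfl, rfl⟩

theorem pvInvRD_shift (g : List (List Int)) (N M i : Nat) (R D : List (List Int))
    (h : pvInvRD g N M i M R D) : pvInvRD g N M (i + 1) 0 R D := by
  obtain ⟨h1, h2, h3⟩ := h
  refine ⟨h1, h2, fun p q hp hq => ?_⟩
  obtain ⟨e1, e2⟩ := h3 p q hp hq
  have hiff : (p < i ∨ (p = i ∧ q < M)) ↔ (p < i + 1 ∨ (p = i + 1 ∧ q < 0)) := by omega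
  rw [e1, e2, if_congr hiff rfl rfl, if_congr hiff rfl rfl]
  exact ⟨rfl, rfl⟩

theorem pvZeros_shape (n m : Int) :
    pvShape ((PySem.List.pyRange 0 n 1).map (fun _ => List.replicate m.toNat (0 : Int)))
      n.toNat m.toNat := by
  constructor
  · simp [PySem.List.length_pyRange_one]
  · intro r hr
    rcases List.mem_map.mp hr with ⟨x, _, rfl⟩
    exact List.length_replicate

theorem pvZeros_entry (n m : Int) (p q : Nat) :
    ((((PySem.List.pyRange 0 n 1).map (fun _ => List.replicate m.toNat (0 : Int))).getD p []).getD q 0) = 0 := by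
  rcases Nat.lt_or_ge p ((PySem.List.pyRange 0 n 1).map (fun _ => List.replicate m.toNat (0 : Int))).length with hp | hp
  · rw [List.getD_eq_getElem _ [] hp, List.getElem_map]
    simp [List.getD_eq_getElem?_getD, List.getElem?_replicate]
    split_ifs <;> rfl
  · rw [List.getD_eq_default _ [] hp]
    rfl

theorem pvBuildRD_char (g : List (List Int)) (n m : Int) (hn : 0 < n) (hm : 0 < m)
    (rd : List (List Int) × List (List Int))
    (hrd : rd = (PySem.List.pyRange 0 n 1).foldl (fun rd i =>
        (PySem.List.pyRange 0 m 1).foldl (fun rd j => pvStepRD g rd i j) rd)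
        ((PySem.List.pyRange 0 n 1).map (fun _ => List.replicate m.toNat (0 : Int)),
         (PySem.List.pyRange 0 n 1).map (fun _ => List.replicate m.toNat (0 : Int)))) :
    pvInvRD g n.toNat m.toNat n.toNat 0 rd.1 rd.2 := by
  subst hrd
  have hinit : pvInvRD g n.toNat m.toNat 0 0
      ((PySem.List.pyRange 0 n 1).map (fun _ => List.replicate m.toNat (0 : Int)))
      ((PySem.List.pyRange 0 n 1).map (fun _ => List.replicate m.toNat (0 : Int))) := by
    refine ⟨pvZeros_shape n m, pvZeros_shape n m, ?_⟩
    intro p q hp hq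
    refine ⟨?_, ?_⟩ <;> rw [pvZeros_entry, if_neg (by omega)]
  have hstep : ∀ (ii : Int) (s : List (List Int) × List (List Int)), 0 ≤ ii → ii < n →
      pvInvRD g n.toNat m.toNat ii.toNat 0 s.1 s.2 →
      pvInvRD g n.toNat m.toNat (ii + 1).toNat 0
        ((PySem.List.pyRange 0 m 1).foldl (fun rd j => pvStepRD g rd ii j) s).1
        ((PySem.List.pyRange 0 m 1).foldl (fun rd j => pvStepRD g rd ii j) s).2 := by
    intro ii s hii0 hiin hs
    have innerstep : ∀ (jj : Int) (t : List (List Int) × List (List Int)), 0 ≤ jj → jj < m →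
        pvInvRD g n.toNat m.toNat ii.toNat jj.toNat t.1 t.2 →
        pvInvRD g n.toNat m.toNat ii.toNat (jj + 1).toNat (pvStepRD g t ii jj).1
          (pvStepRD g t ii jj).2 := by
      intro jj t hjj0 hjjm ht
      have hii : ((ii.toNat : Nat) : Int) = ii := Int.toNat_of_nonneg hii0
      have hjj : ((jj.toNat : Nat) : Int) = jj := Int.toNat_of_nonneg hjj0
      have step := pvStepRD_inv g n.toNat m.toNat ii.toNat jj.toNat t.1 t.2
        (by omega) (by omega) ht
      rw [hii, hjj, Prod.mk.eta] at step
      rw [show (jj + 1).toNat = jj.toNat + 1 from by omega]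
      exact step
    have inner := pyRange_fold_inv (σ := List (List Int) × List (List Int))
      (fun rd j => pvStepRD g rd ii j)
      (fun jj t => pvInvRD g n.toNat m.toNat ii.toNat jj.toNat t.1 t.2) 0 m
      innerstep (m - 0).toNat 0 le_rfl le_rfl (by omega) s hs
    have shifted := pvInvRD_shift g n.toNat m.toNat ii.toNat _ _
      (by rw [show m.toNat = (m : Int).toNat from rfl] at inner; exact inner)
    rw [show (ii + 1).toNat = ii.toNat + 1 from by omega]
    exact shifted
  refine pyRange_fold_inv (σ := List (List Int) × List (List Int))
    (fun rd i => (PySem.List.pyRange 0 m 1).foldl (fun rd j => pvStepRD g rd i j) rd)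
    (fun ii s => pvInvRD g n.toNat m.toNat ii.toNat 0 s.1 s.2) 0 n
    hstep (n - 0).toNat 0 le_rfl le_rfl (by omega) _ ?_
  exact hinit

theorem pvRD_entry (g : List (List Int)) (N M : Nat) (R D : List (List Int))
    (h : pvInvRD g N M N 0 R D) (p q : Nat) (hp : p < N) (hq : q < M) :
    pvGet2 R (p : Int) (q : Int) = (pvRowRun g p q : Int) ∧
    pvGet2 D (p : Int) (q : Int) = (pvColRun g q p : Int) := by
  rw [pvGet2_natCast, pvGet2_natCast]
  obtain ⟨e1, e2⟩ := h.2.2 p q hp hq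
  rw [e1, e2, if_pos (Or.inl hp), if_pos (Or.inl hp)]
  exact ⟨rfl, rfl⟩

-- ---- characterization of B's prefix-sum table ----
theorem pvPref_succ_succ (g : List (List Int)) (a b : Nat) :
    pvPref g (a + 1) (b + 1) =
      pvPref g a (b + 1) + pvPref g (a + 1) b - pvPref g a b + pvOne g a b := by
  simp only [pvPref, pvRowPref]
  ring

def pvInvP (g : List (List Int)) (N M i a : Nat) (P : List (List Int)) : Prop :=
  pvShape P (N + 1) (M + 1) ∧
  ∀ p q : Nat, p ≤ N → q ≤ M →
    (P.getD p []).getD q 0 =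
      (if p = 0 ∨ q = 0 ∨ p - 1 < i ∨ (p - 1 = i ∧ q - 1 < a) then pvPref g p q else 0)

theorem pvStepP_inv (g : List (List Int)) (N M i a : Nat) (P : List (List Int))
    (hi : i < N) (ha : a < M) (h : pvInvP g N M i a P) :
    pvInvP g N M i (a + 1) (pvStepP g P (i : Int) (a : Int)) := by
  obtain ⟨hS, hent⟩ := h
  have c1 : ((i : Int) + 1) = ((i + 1 : Nat) : Int) := by push_cast; ring
  have c2 : ((a : Int) + 1) = ((a + 1 : Nat) : Int) := by push_cast; ring
  have e1 : pvGet2 P (i : Int) ((a : Int) + 1) = pvPref g i (a + 1) := by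
    rw [c2, pvGet2_natCast, hent i (a + 1) (by omega) (by omega), if_pos (by omega)]
  have e2 : pvGet2 P ((i : Int) + 1) (a : Int) = pvPref g (i + 1) a := by
    rw [c1, pvGet2_natCast, hent (i + 1) a (by omega) (by omega), if_pos (by omega)]
  have e3 : pvGet2 P (i : Int) (a : Int) = pvPref g i a := by
    rw [pvGet2_natCast, hent i a (by omega) (by omega), if_pos (by omega)]
  have eind : (if pvGet2 g (i : Int) (a : Int) = 1 then (1 : Int) else 0) = pvOne g i a := by
    rw [pvGet2_natCast]; rfl
  have hstep : pvStepP g P (i : Int) (a : Int) =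
      P.set (i + 1) ((P.getD (i + 1) []).set (a + 1) (pvPref g (i + 1) (a + 1))) := by
    unfold pvStepP
    rw [e1, e2, e3, eind, ← pvPref_succ_succ, c1, c2, pvSet2_natCast]
  rw [hstep]
  have hPlen : i + 1 < P.length := by rw [hS.1]; omega
  refine ⟨pvShape_set P (N + 1) (M + 1) (i + 1) (a + 1) _ hPlen hS, ?_⟩
  intro p q hp hq
  have hrow : (P.getD (i + 1) []).length = M + 1 := pvShape_row_len P (N + 1) (M + 1) (i + 1) hS (by omega)
  rw [pvGet2_set P (i + 1) (a + 1) p q _ hPlen]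
  by_cases hpq : p = i + 1 ∧ q = a + 1
  · obtain ⟨rfl, rfl⟩ := hpq
    rw [if_pos ⟨rfl, rfl, by omega⟩, if_pos (by omega)]
  · rw [if_neg (by rw [hrow]; tauto), hent p q hp hq]
    have hiff : (p = 0 ∨ q = 0 ∨ p - 1 < i ∨ (p - 1 = i ∧ q - 1 < a)) ↔
        (p = 0 ∨ q = 0 ∨ p - 1 < i ∨ (p - 1 = i ∧ q - 1 < a + 1)) := by omega
    rw [if_congr hiff rfl rfl]

theorem pvInvP_shift (g : List (List Int)) (N M i : Nat) (P : List (List Int))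
    (h : pvInvP g N M i M P) : pvInvP g N M (i + 1) 0 P := by
  obtain ⟨hS, hent⟩ := h
  refine ⟨hS, fun p q hp hq => ?_⟩
  rw [hent p q hp hq]
  have hiff : (p = 0 ∨ q = 0 ∨ p - 1 < i ∨ (p - 1 = i ∧ q - 1 < M)) ↔
      (p = 0 ∨ q = 0 ∨ p - 1 < i + 1 ∨ (p - 1 = i + 1 ∧ q - 1 < 0)) := by omega
  rw [if_congr hiff rfl rfl]

theorem pvBuildP_char (g : List (List Int)) (n m : Int) (hn : 0 < n) (hm : 0 < m)
    (P : List (List Int))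
    (hP : P = (PySem.List.pyRange 0 n 1).foldl (fun P i =>
        (PySem.List.pyRange 0 m 1).foldl (fun P j => pvStepP g P i j) P)
        ((PySem.List.pyRange 0 (n + 1) 1).map (fun _ => List.replicate (m + 1).toNat (0 : Int)))) :
    pvInvP g n.toNat m.toNat n.toNat 0 P := by
  subst hP
  have hinit : pvInvP g n.toNat m.toNat 0 0
      ((PySem.List.pyRange 0 (n + 1) 1).map (fun _ => List.replicate (m + 1).toNat (0 : Int))) := by
    have hsh : pvShape ((PySem.List.pyRange 0 (n + 1) 1).map
        (fun _ => List.replicate (m + 1).toNat (0 : Int))) (n.toNat + 1) (m.toNat + 1) := by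
      have h0 := pvZeros_shape (n + 1) (m + 1)
      refine ⟨?_, ?_⟩
      · have := h0.1; omega
      · intro r hr; have := h0.2 r hr; omega
    refine ⟨hsh, ?_⟩
    intro p q hp hq
    rw [pvZeros_entry]
    split_ifs with hcond
    · rcases hcond with rfl | rfl | hlt | ⟨heq, hlt⟩
      · rfl
      · rw [pvPref_zero_right]
      · omega
      · omega
    · rfl
  have hstep : ∀ (ii : Int) (s : List (List Int)), 0 ≤ ii → ii < n →
      pvInvP g n.toNat m.toNat ii.toNat 0 s →
      pvInvP g n.toNat m.toNat (ii + 1).toNat 0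
        ((PySem.List.pyRange 0 m 1).foldl (fun P j => pvStepP g P ii j) s) := by
    intro ii s hii0 hiin hs
    have innerstep : ∀ (jj : Int) (t : List (List Int)), 0 ≤ jj → jj < m →
        pvInvP g n.toNat m.toNat ii.toNat jj.toNat t →
        pvInvP g n.toNat m.toNat ii.toNat (jj + 1).toNat (pvStepP g t ii jj) := by
      intro jj t hjj0 hjjm ht
      have hii : ((ii.toNat : Nat) : Int) = ii := Int.toNat_of_nonneg hii0
      have hjj : ((jj.toNat : Nat) : Int) = jj := Int.toNat_of_nonneg hjj0
      have step := pvStepP_inv g n.toNat m.toNat ii.toNat jj.toNat t (by omega) (by omega) ht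
      rw [hii, hjj] at step
      rw [show (jj + 1).toNat = jj.toNat + 1 from by omega]
      exact step
    have inner := pyRange_fold_inv (σ := List (List Int))
      (fun P j => pvStepP g P ii j)
      (fun jj t => pvInvP g n.toNat m.toNat ii.toNat jj.toNat t) 0 m
      innerstep (m - 0).toNat 0 le_rfl le_rfl (by omega) s hs
    have shifted := pvInvP_shift g n.toNat m.toNat ii.toNat _
      (by rw [show m.toNat = (m : Int).toNat from rfl] at inner; exact inner)
    rw [show (ii + 1).toNat = ii.toNat + 1 from by omega]
    exact shifted
  refine pyRange_fold_inv (σ := List (List Int))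
    (fun P i => (PySem.List.pyRange 0 m 1).foldl (fun P j => pvStepP g P i j) P)
    (fun ii t => pvInvP g n.toNat m.toNat ii.toNat 0 t) 0 n
    hstep (n - 0).toNat 0 le_rfl le_rfl (by omega) _ ?_
  exact hinit

theorem pvP_entry (g : List (List Int)) (N M : Nat) (P : List (List Int))
    (h : pvInvP g N M N 0 P) (p q : Nat) (hp : p ≤ N) (hq : q ≤ M) :
    pvGet2 P (p : Int) (q : Int) = pvPref g p q := by
  rw [pvGet2_natCast, h.2 p q hp hq]
  rcases Nat.eq_zero_or_pos p with rfl | hp0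
  · rw [if_pos (by omega)]
  · rw [if_pos (by omega)]

-- ---- the two descending while loops agree ----
theorem pvWhileA_fst_mono :
    ∀ (k : Nat) (right down : List (List Int)) (i j s : Int) (st : Int × Int × Int),
      st.1 ≤ (pvWhileA right down i j k s st).1 := by
  intro k
  induction k with
  | zero => intro right down i j s st; exact le_rfl
  | succ k ih =>
    intro right down i j s st
    rw [pvWhileA]
    split_ifs with h1 h2
    · have := ih right down i j (s - 1) (s, i - s + 1, j - s + 1)
      refine le_trans ?_ this
      show st.1 ≤ s
      omega
    · exact ih right down i j (s - 1) st
    · exact le_rfl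

theorem pvWhile_eq (RT DT P : List (List Int)) (i j sA : Int)
    (hK1 : ∀ s : Int, 1 ≤ s → s ≤ sA →
      ((pvRect P (i - s + 1) (j - s + 1) (i - s + 1) j = s ∧ pvRect P i (j - s + 1) i j = s ∧
        pvRect P (i - s + 1) (j - s + 1) i (j - s + 1) = s ∧ pvRect P (i - s + 1) j i j = s) ↔
       (pvGet2 DT i (j - s + 1) ≥ s ∧ pvGet2 RT (i - s + 1) j ≥ s)))
    (hK2 : ∀ s : Int, sA < s → 1 ≤ s → s ≤ min i j + 1 →
      ¬(pvRect P (i - s + 1) (j - s + 1) (i - s + 1) j = s ∧ pvRect P i (j - s + 1) i j = s ∧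
        pvRect P (i - s + 1) (j - s + 1) i (j - s + 1) = s ∧ pvRect P (i - s + 1) j i j = s)) :
    ∀ (k : Nat) (k' : Nat) (sB : Int) (st : Int × Int × Int),
      (sB - st.1).toNat ≤ k → (min sB sA - st.1).toNat ≤ k' → 0 ≤ st.1 →
      sB ≤ min i j + 1 →
      pvWhileB P i j k sB st = pvWhileA RT DT i j k' (min sB sA) st := by
  intro k
  induction k with
  | zero =>
    intro k' sB st hk hk' h0 hsB
    cases k' with
    | zero => rfl
    | succ k' => rw [pvWhileA, if_neg (by omega)]; rfl
  | succ k ih =>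
    intro k' sB st hk hk' h0 hsB
    by_cases hgt : sB > st.1
    · have h1 : (1 : Int) ≤ sB := by omega
      by_cases hle : sB ≤ sA
      · have hmin : min sB sA = sB := by omega
        obtain ⟨k'', rfl⟩ : ∃ k'', k' = k'' + 1 := ⟨k' - 1, by omega⟩
        rw [hmin, pvWhileB, pvWhileA, if_pos hgt, if_pos hgt]
        by_cases hc : (pvRect P (i - sB + 1) (j - sB + 1) (i - sB + 1) j = sB ∧
            pvRect P i (j - sB + 1) i j = sB ∧
            pvRect P (i - sB + 1) (j - sB + 1) i (j - sB + 1) = sB ∧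
            pvRect P (i - sB + 1) j i j = sB)
        · rw [if_pos hc, if_pos ((hK1 sB h1 hle).mp hc)]
          have := ih k'' (sB - 1) (sB, i - sB + 1, j - sB + 1)
            (show (sB - 1 - sB).toNat ≤ k from by omega)
            (show (min (sB - 1) sA - sB).toNat ≤ k'' from by omega)
            (show (0 : Int) ≤ sB from by omega) (by omega)
          rw [this, show min (sB - 1) sA = sB - 1 from by omega]
        · rw [if_neg hc, if_neg (fun hA => hc ((hK1 sB h1 hle).mpr hA))]
          have := ih k'' (sB - 1) st (by omega)
            (show (min (sB - 1) sA - st.1).toNat ≤ k'' from by omega) h0 (by omega)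
          rw [this, show min (sB - 1) sA = sB - 1 from by omega]
      · have hmin : min sB sA = sA := by omega
        rw [hmin, pvWhileB, if_pos hgt, if_neg (hK2 sB (by omega) h1 hsB)]
        have := ih k' (sB - 1) st (by omega)
          (show (min (sB - 1) sA - st.1).toNat ≤ k' from by omega) h0 (by omega)
        rw [this, show min (sB - 1) sA = sA from by omega]
    · rw [pvWhileB, if_neg hgt]
      cases k' with
      | zero => rfl
      | succ k' => rw [pvWhileA, if_neg (by omega)]

-- ---- border segments through the prefix table ----
theorem pvRect_row (g : List (List Int)) (N M : Nat) (P : List (List Int))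
    (hP : pvInvP g N M N 0 P) (r c j' : Nat)
    (hr : r < N) (hc : c ≤ M) (hj : j' < M) :
    pvRect P (r : Int) (c : Int) (r : Int) (j' : Int) =
      pvRowPref g r (j' + 1) - pvRowPref g r c := by
  have hg := pvP_entry g N M P hP
  unfold pvRect
  rw [show ((r : Int) + 1) = ((r + 1 : Nat) : Int) from by push_cast; ring,
    show ((j' : Int) + 1) = ((j' + 1 : Nat) : Int) from by push_cast; ring,
    hg (r + 1) (j' + 1) (by omega) (by omega), hg r (j' + 1) (by omega) (by omega),
    hg (r + 1) c (by omega) (by omega), hg r c (by omega) (by omega),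
    show pvPref g (r + 1) (j' + 1) = pvPref g r (j' + 1) + pvRowPref g r (j' + 1) from rfl,
    show pvPref g (r + 1) c = pvPref g r c + pvRowPref g r c from rfl]
  ring

theorem pvRect_col (g : List (List Int)) (N M : Nat) (P : List (List Int))
    (hP : pvInvP g N M N 0 P) (r c i' : Nat)
    (hr : r ≤ N) (hc : c < M) (hi : i' < N) :
    pvRect P (r : Int) (c : Int) (i' : Int) (c : Int) =
      pvColPref g c (i' + 1) - pvColPref g c r := by
  have hg := pvP_entry g N M P hP
  unfold pvRect
  rw [show ((i' : Int) + 1) = ((i' + 1 : Nat) : Int) from by push_cast; ring,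
    show ((c : Int) + 1) = ((c + 1 : Nat) : Int) from by push_cast; ring,
    hg (i' + 1) (c + 1) (by omega) (by omega), hg r (c + 1) (by omega) (by omega),
    hg (i' + 1) c (by omega) (by omega), hg r c (by omega) (by omega),
    pvPref_col g c (i' + 1), pvPref_col g c r]
  ring

-- ---- per-corner agreement of the two inner loops ----
theorem pvCorner_eq (g : List (List Int)) (n m : Int) (RT DT P : List (List Int))
    (hn : 0 < n) (hm : 0 < m)
    (hRD : pvInvRD g n.toNat m.toNat n.toNat 0 RT DT)
    (hP : pvInvP g n.toNat m.toNat n.toNat 0 P)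
    (ii jj : Int) (hii0 : 0 ≤ ii) (hiin : ii < n) (hjj0 : 0 ≤ jj) (hjjm : jj < m)
    (st : Int × Int × Int) (h0 : 0 ≤ st.1) :
    pvWhileB P ii jj (min ii jj + 1 - st.1).toNat (min ii jj + 1) st =
      pvWhileA RT DT ii jj (min (pvGet2 RT ii jj) (pvGet2 DT ii jj) - st.1).toNat
        (min (pvGet2 RT ii jj) (pvGet2 DT ii jj)) st := by
  have hipN : ii.toNat < n.toNat := by omega
  have hjpM : jj.toNat < m.toNat := by omega
  have hci : ((ii.toNat : Nat) : Int) = ii := Int.toNat_of_nonneg hii0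
  have hcj : ((jj.toNat : Nat) : Int) = jj := Int.toNat_of_nonneg hjj0
  set ip := ii.toNat with hip
  set jp := jj.toNat with hjp
  set rr := pvRowRun g ip jp with hrrdef
  set cc := pvColRun g jp ip with hccdef
  have hrr : rr ≤ jp + 1 := pvRowRun_le g ip jp
  have hcc : cc ≤ ip + 1 := pvColRun_le g jp ip
  have hE := pvRD_entry g n.toNat m.toNat RT DT hRD ip jp hipN hjpM
  rw [hci, hcj] at hE
  -- the six corner facts, for every admissible side length s
  have H : ∀ s : Int, 1 ≤ s → s ≤ (ip : Int) + 1 → s ≤ (jp : Int) + 1 →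
      ((pvRect P (ii - s + 1) (jj - s + 1) (ii - s + 1) jj = s ↔
          s.toNat ≤ pvRowRun g (ip + 1 - s.toNat) jp) ∧
       (pvRect P ii (jj - s + 1) ii jj = s ↔ s.toNat ≤ rr) ∧
       (pvRect P (ii - s + 1) (jj - s + 1) ii (jj - s + 1) = s ↔
          s.toNat ≤ pvColRun g (jp + 1 - s.toNat) ip) ∧
       (pvRect P (ii - s + 1) jj ii jj = s ↔ s.toNat ≤ cc) ∧
       pvGet2 DT ii (jj - s + 1) = (pvColRun g (jp + 1 - s.toNat) ip : Int) ∧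
       pvGet2 RT (ii - s + 1) jj = (pvRowRun g (ip + 1 - s.toNat) jp : Int)) := by
    intro s h1 hsi hsj
    have hcast : ((s.toNat : Nat) : Int) = s := by omega
    have e1 : ii - s + 1 = ((ip + 1 - s.toNat : Nat) : Int) := by omega
    have e2 : jj - s + 1 = ((jp + 1 - s.toNat : Nat) : Int) := by omega
    have hsN1 : 1 ≤ s.toNat := by omega
    refine ⟨?_, ?_, ?_, ?_, ?_, ?_⟩
    · rw [e1, e2, ← hcj,
        pvRect_row g n.toNat m.toNat P hP (ip + 1 - s.toNat) (jp + 1 - s.toNat) jp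
          (by omega) (by omega) hjpM, ← hcast]
      exact pvRowSeg_iff g (ip + 1 - s.toNat) s.toNat jp hsN1 (by omega)
    · rw [e2, ← hci, ← hcj,
        pvRect_row g n.toNat m.toNat P hP ip (jp + 1 - s.toNat) jp hipN (by omega) hjpM,
        ← hcast]
      exact pvRowSeg_iff g ip s.toNat jp hsN1 (by omega)
    · rw [e1, e2, ← hci,
        pvRect_col g n.toNat m.toNat P hP (ip + 1 - s.toNat) (jp + 1 - s.toNat) ip
          (by omega) (by omega) hipN, ← hcast]
      exact pvColSeg_iff g (jp + 1 - s.toNat) s.toNat ip hsN1 (by omega)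
    · rw [e1, ← hci, ← hcj,
        pvRect_col g n.toNat m.toNat P hP (ip + 1 - s.toNat) jp ip (by omega) hjpM hipN,
        ← hcast]
      exact pvColSeg_iff g jp s.toNat ip hsN1 (by omega)
    · rw [e2, ← hci]
      exact (pvRD_entry g n.toNat m.toNat RT DT hRD ip (jp + 1 - s.toNat) hipN (by omega)).2
    · rw [e1, ← hcj]
      exact (pvRD_entry g n.toNat m.toNat RT DT hRD (ip + 1 - s.toNat) jp (by omega) hjpM).1
  rw [hE.1, hE.2]
  have hsA : min (rr : Int) (cc : Int) ≤ min ii jj + 1 := by omega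
  have main := pvWhile_eq RT DT P ii jj (min (rr : Int) (cc : Int)) ?_ ?_
    (min ii jj + 1 - st.1).toNat ((min (rr : Int) (cc : Int) - st.1).toNat)
    (min ii jj + 1) st le_rfl (by omega) h0 le_rfl
  · rw [main, show min (min ii jj + 1) (min (rr : Int) (cc : Int)) = min (rr : Int) (cc : Int)
      from by omega]
  · -- hK1
    intro s h1 hle
    obtain ⟨hTop, hBot, hLeft, hRight, hD, hR⟩ := H s h1 (by omega) (by omega)
    rw [hD, hR]
    constructor
    · rintro ⟨t, b, l, r⟩
      exact ⟨by have := hLeft.mp l; omega, by have := hTop.mp t; omega⟩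
    · rintro ⟨hd, hr2⟩
      exact ⟨hTop.mpr (by omega), hBot.mpr (by omega), hLeft.mpr (by omega),
        hRight.mpr (by omega)⟩
  · -- hK2
    intro s hlt h1 hsB
    obtain ⟨hTop, hBot, hLeft, hRight, hD, hR⟩ := H s h1 (by omega) (by omega)
    rintro ⟨t, b, l, r⟩
    have h2 := hBot.mp b
    have h3 := hRight.mp r
    omega

-- ---- the two main double loops agree ----
theorem pvMain_eq (g : List (List Int)) (n m : Int) (RT DT P : List (List Int))
    (hn : 0 < n) (hm : 0 < m)
    (hRD : pvInvRD g n.toNat m.toNat n.toNat 0 RT DT)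
    (hP : pvInvP g n.toNat m.toNat n.toNat 0 P) :
    (PySem.List.pyRange 0 n 1).foldl (fun st ii =>
        (PySem.List.pyRange 0 m 1).foldl (fun st jj =>
          pvWhileB P ii jj (min ii jj + 1 - st.1).toNat (min ii jj + 1) st) st) (0, 0, 0) =
    (PySem.List.pyRange 0 n 1).foldl (fun st ii =>
        (PySem.List.pyRange 0 m 1).foldl (fun st jj =>
          pvWhileA RT DT ii jj (min (pvGet2 RT ii jj) (pvGet2 DT ii jj) - st.1).toNat
            (min (pvGet2 RT ii jj) (pvGet2 DT ii jj)) st) st) (0, 0, 0) := by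
  have main := pyRange_fold_rel (σ := Int × Int × Int) (τ := Int × Int × Int)
    (fun st ii => (PySem.List.pyRange 0 m 1).foldl (fun st jj =>
      pvWhileB P ii jj (min ii jj + 1 - st.1).toNat (min ii jj + 1) st) st)
    (fun st ii => (PySem.List.pyRange 0 m 1).foldl (fun st jj =>
      pvWhileA RT DT ii jj (min (pvGet2 RT ii jj) (pvGet2 DT ii jj) - st.1).toNat
        (min (pvGet2 RT ii jj) (pvGet2 DT ii jj)) st) st)
    (fun s t => s = t ∧ 0 ≤ t.1) 0 n ?_ (n - 0).toNat 0 le_rfl le_rfl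
    (0, 0, 0) (0, 0, 0) ⟨rfl, le_rfl⟩
  · exact main.1
  · intro ii s t hii0 hiin hst
    exact pyRange_fold_rel (σ := Int × Int × Int) (τ := Int × Int × Int)
      (fun st jj => pvWhileB P ii jj (min ii jj + 1 - st.1).toNat (min ii jj + 1) st)
      (fun st jj => pvWhileA RT DT ii jj (min (pvGet2 RT ii jj) (pvGet2 DT ii jj) - st.1).toNat
        (min (pvGet2 RT ii jj) (pvGet2 DT ii jj)) st)
      (fun s t => s = t ∧ 0 ≤ t.1) 0 m
      (fun jj s t hjj0 hjjm hst => by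
        obtain ⟨rfl, h0⟩ := hst
        refine ⟨pvCorner_eq g n m RT DT P hn hm hRD hP ii jj hii0 hiin hjj0 hjjm s h0, ?_⟩
        exact le_trans h0 (pvWhileA_fst_mono
          (min (pvGet2 RT ii jj) (pvGet2 DT ii jj) - s.1).toNat RT DT ii jj _ s))
      (m - 0).toNat 0 le_rfl le_rfl s t hst

-- ===== VERDICT (by name: the statement is the Claim_ definition above) =====

-- ===== VERDICT (by name: the statement is the Claim_ definition above) =====
theorem find_max_square_spec : Claim_equal_find_max_square := by
  intro n m grid _ _
  unfold Spec_find_max_square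
  show find_max_square n m grid = find_max_square_alt n m grid
  simp only [find_max_square, find_max_square_alt]
  rcases (by omega : n ≤ 0 ∨ 0 < n) with hn | hn
  · rw [PySem.List.pyRange_one_eq_nil hn]
    simp
  · rcases (by omega : m ≤ 0 ∨ 0 < m) with hm | hm
    · rw [PySem.List.pyRange_one_eq_nil hm]
      simp [List.foldl_fixed]
    · exact (pvMain_eq grid n m _ _ _ hn hm
        (pvBuildRD_char grid n m hn hm _ rfl) (pvBuildP_char grid n m hn hm _ rfl)).symm
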